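-- pv_equiv track=rewrite | github.com/palchhinparihar/codedex-daily-challenge | code/day15.py | oscar_pool
-- ===== SOURCE A (Python) =====
-- def oscar_pool(predictions):
--   # actual winners list
--   actual_winners = ['One Battle After Another', 'Michael B. Jordan', 'Jessie Buckley', 'Paul Thomas Anderson']
--
--   highest_pred = {}
--
--   # check from predictions for particular name - if they predictions match with actual winners
--   for name, picture, actor, actress, director in predictions:
--     highest_pred[name] = 0
--
--     if picture == actual_winners[0]:
--       highest_pred[name] += 1
--     if actor == actual_winners[1]:
--       highest_pred[name] += 1
--     if actress == actual_winners[2]: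
--       highest_pred[name] += 1
--     if director == actual_winners[3]:
--       highest_pred[name] += 1
--
--   ans = ''
--   highest_prediction = 0
--
--   # find the person with highest score -  if tie simple return "Tie"
--   for name, count in highest_pred.items():
--     if count > highest_prediction:
--       highest_prediction = count
--       ans = name
--     elif highest_prediction == count:
--       ans = 'Tie'
--
--   return ans
-- ===== SOURCE B (Python) =====
-- def oscar_pool(predictions):
--   actual_winners = ('One Battle After Another', 'Michael B. Jordan', 'Jessie Buckley', 'Paul Thomas Anderson')
--
--   # score every entrant (dict comprehension: last entry wins for duplicate names)
--   scores = {e[0]: sum(pick == winner for pick, winner in zip(e[1:], actual_winners))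
--             for e in predictions}
--
--   # sort-then-scan: order entrants by score descending, inspect the top two
--   ranked = sorted(scores.items(), key=lambda kv: kv[1], reverse=True)
--   if not ranked:
--     return ''
--   top_name, top = ranked[0]
--   if top == 0 or (len(ranked) > 1 and ranked[1][1] == top):
--     return 'Tie'
--   return top_name
-- ===== Notes on version B (the rewrite author's own statement) =====
-- stated objective: alternative
-- what changed: Replaces A's single-pass running-max with order-dependent tie flag by a sort-then-scan: scores go into a dict comprehension, the entries are sorted by score descending, and the answer is read off the top two entries (Tie if the top score is 0 or the second entry matches it).
import Mathlib
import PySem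

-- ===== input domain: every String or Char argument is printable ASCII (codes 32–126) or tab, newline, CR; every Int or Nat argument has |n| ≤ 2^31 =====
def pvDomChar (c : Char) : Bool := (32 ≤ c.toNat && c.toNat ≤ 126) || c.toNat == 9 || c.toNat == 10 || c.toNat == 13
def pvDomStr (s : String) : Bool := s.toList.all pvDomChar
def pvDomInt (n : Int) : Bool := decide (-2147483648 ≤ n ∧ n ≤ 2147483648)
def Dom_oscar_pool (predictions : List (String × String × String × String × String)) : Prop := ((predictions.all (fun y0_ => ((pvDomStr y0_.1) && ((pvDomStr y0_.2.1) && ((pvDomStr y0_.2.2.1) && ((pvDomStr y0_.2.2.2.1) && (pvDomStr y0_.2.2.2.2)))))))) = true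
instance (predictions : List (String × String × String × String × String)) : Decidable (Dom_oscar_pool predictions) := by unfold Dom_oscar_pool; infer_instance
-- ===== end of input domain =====

-- B replaces A's single-pass running-max/tie-flag loop by sort-then-scan: sort the scored
-- entries by score descending and read the answer off the top two (objective: alternative).

-- ===== PORT A =====
-- `highest_pred[name] += 1` is ported as `modify name 0 (· + 1)`: the key is always
-- present here (inserted just above), so the default 0 is never used and this is exact.
def oscar_pool (predictions : List (String × String × String × String × String)) : String :=
  let actual_winners : List String :=
    ["One Battle After Another", "Michael B. Jordan", "Jessie Buckley", "Paul Thomas Anderson"]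
  let highest_pred : PySem.Dict String Int :=
    predictions.foldl (fun d q =>
      let (name, picture, actor, actress, director) := q
      let d := d.insert name 0
      let d := if picture == PySem.List.pyGetD actual_winners 0 "" then d.modify name 0 (· + 1) else d
      let d := if actor == PySem.List.pyGetD actual_winners 1 "" then d.modify name 0 (· + 1) else d
      let d := if actress == PySem.List.pyGetD actual_winners 2 "" then d.modify name 0 (· + 1) else d
      let d := if director == PySem.List.pyGetD actual_winners 3 "" then d.modify name 0 (· + 1) else d
      d) PySem.Dict.empty
  let r := highest_pred.items.foldl (fun (st : String × Int) p =>
      if p.2 > st.2 then (p.1, p.2)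
      else if st.2 == p.2 then ("Tie", st.2)
      else st) ("", 0)
  r.1

-- ===== PORT B =====
-- `sum(pick == winner for …)` is ported as the sum of the four 0/1 comparisons;
-- `ranked[0]` / `ranked[1]` under the emptiness/length tests are ported as the match arms.
def oscar_pool_alt (predictions : List (String × String × String × String × String)) : String :=
  let actual_winners : String × String × String × String :=
    ("One Battle After Another", "Michael B. Jordan", "Jessie Buckley", "Paul Thomas Anderson")
  let scores : PySem.Dict String Int :=
    predictions.foldl (fun d e =>
      d.insert e.1
        ((if e.2.1 == actual_winners.1 then (1 : Int) else 0) +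
         (if e.2.2.1 == actual_winners.2.1 then 1 else 0) +
         (if e.2.2.2.1 == actual_winners.2.2.1 then 1 else 0) +
         (if e.2.2.2.2 == actual_winners.2.2.2 then 1 else 0))) PySem.Dict.empty
  let ranked := PySem.List.sorted scores.items (fun kv => kv.2) true
  match ranked with
  | [] => ""
  | (top_name, top) :: rest =>
    if top == 0 || (match rest with | [] => false | (_, s) :: _ => s == top)
    then "Tie" else top_name

-- ===== PRECONDITION & SPEC =====
def Spec_oscar_pool (predictions : List (String × String × String × String × String)) (out : String) : Prop := out = oscar_pool_alt predictions
instance (predictions : List (String × String × String × String × String)) (out : String) : Decidable (Spec_oscar_pool predictions out) := by unfold Spec_oscar_pool; infer_instance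

-- ===== CLAIM (what is proved, stated in full; the proofs are below) =====
def Claim_equal_oscar_pool : Prop := ∀ (predictions : List (String × String × String × String × String)), Dom_oscar_pool predictions → Spec_oscar_pool predictions (oscar_pool predictions)

-- ===== LEMMAS AND PROOFS =====

-- A's loop step over (ans, highest_prediction)
def pvStep (st : String × Int) (p : String × Int) : String × Int :=
  if p.2 > st.2 then (p.1, p.2)
  else if st.2 == p.2 then ("Tie", st.2)
  else st

-- running maximum of the scores, floored at A's initial 0
def pvMx (l : List (String × Int)) : Int := l.foldl (fun a p => max a p.2) 0

-- canonical answer as a function of the item list: the unique positive-max name, else "Tie"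
def pvFin (l : List (String × Int)) : String :=
  if 0 < pvMx l ∧ ((l.filter (fun p => p.2 == pvMx l)).map Prod.fst).length = 1
  then ((l.filter (fun p => p.2 == pvMx l)).map Prod.fst).headD ""
  else "Tie"

theorem pvMx_append (l : List (String × Int)) (x : String × Int) :
    pvMx (l ++ [x]) = max (pvMx l) x.2 := by
  simp [pvMx, List.foldl_append]

theorem pvMx_attained (l : List (String × Int)) :
    pvMx l = 0 ∨ ∃ p ∈ l, p.2 = pvMx l := by
  induction l using List.reverseRecOn with
  | nil => left; rfl
  | append_singleton l x ih =>
    rw [pvMx_append]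
    by_cases h : pvMx l ≤ x.2
    · right; exact ⟨x, by simp, by omega⟩
    · rcases ih with h0 | ⟨p, hp, hv⟩
      · left; omega
      · right; exact ⟨p, by simp [hp], by omega⟩

-- A's loop computes (the canonical answer, the maximum), provided all scores are nonnegative.
theorem pvLoop (l : List (String × Int)) (h : ∀ p ∈ l, 0 ≤ p.2) :
    l.foldl pvStep ("", 0) = ((if l = [] then "" else pvFin l), pvMx l) := by
  induction l using List.reverseRecOn with
  | nil => rfl
  | append_singleton l x ih =>
    have h' : ∀ p ∈ l, 0 ≤ p.2 := fun p hp => h p (by simp [hp])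
    have hx : 0 ≤ x.2 := h x (by simp)
    have hMnn : 0 ≤ pvMx l := (PySem.List.le_foldl_max_int l Prod.snd 0).1
    have hub : ∀ p ∈ l, p.2 ≤ pvMx l := (PySem.List.le_foldl_max_int l Prod.snd 0).2
    rw [List.foldl_append, ih h', List.foldl_cons, List.foldl_nil]
    rcases lt_trichotomy (pvMx l) x.2 with hgt | heq | hlt
    · -- a new strict maximum
      have hstep : pvStep ((if l = [] then "" else pvFin l), pvMx l) x = (x.1, x.2) := by
        simp [pvStep, hgt]
      rw [hstep]
      have hM' : pvMx (l ++ [x]) = x.2 := by rw [pvMx_append]; omega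
      have hfl : l.filter (fun p => p.2 == pvMx (l ++ [x])) = [] := by
        rw [List.filter_eq_nil_iff]
        intro p hp
        have := hub p hp
        simp only [beq_iff_eq, hM']
        omega
      have hone : pvFin (l ++ [x]) = x.1 := by
        unfold pvFin
        rw [List.filter_append, hfl, List.nil_append]
        have hx2 : List.filter (fun p => p.2 == pvMx (l ++ [x])) [x] = [x] := by
          simp [hM']
        rw [hx2, if_pos ⟨by omega, by simp⟩]
        rfl
      rw [if_neg (by simp), hone, hM']
    · -- ties the running maximum
      have hstep : pvStep ((if l = [] then "" else pvFin l), pvMx l) x = ("Tie", pvMx l) := by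
        simp [pvStep, heq]
      rw [hstep]
      have hM' : pvMx (l ++ [x]) = pvMx l := by rw [pvMx_append]; omega
      have hTie : pvFin (l ++ [x]) = "Tie" := by
        unfold pvFin
        by_cases hz : 0 < pvMx (l ++ [x])
        · rcases pvMx_attained l with h0 | ⟨r, hr, hv⟩
          · omega
          · have hr1 : r ∈ l.filter (fun p => p.2 == pvMx (l ++ [x])) :=
              List.mem_filter.2 ⟨hr, by simp [hM', hv]⟩
            have hlen : ¬ (((l ++ [x]).filter (fun p => p.2 == pvMx (l ++ [x]))).map Prod.fst).length = 1 := by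
              rw [List.length_map, List.filter_append, List.length_append]
              have h1 : 0 < (l.filter (fun p => p.2 == pvMx (l ++ [x]))).length :=
                List.length_pos_of_mem hr1
              have h2 : (List.filter (fun p => p.2 == pvMx (l ++ [x])) [x]).length = 1 := by
                simp [hM', ← heq]
              omega
            rw [if_neg (by tauto)]
        · rw [if_neg (by tauto)]
      rw [if_neg (by simp), hTie, hM']
    · -- below the running maximum: state unchanged
      have hstep : pvStep ((if l = [] then "" else pvFin l), pvMx l) x
          = ((if l = [] then "" else pvFin l), pvMx l) := by
        simp [pvStep, show ¬ (x.2 > pvMx l) by omega, show ¬ (pvMx l = x.2) by omega]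
      rw [hstep]
      have hne : l ≠ [] := by
        rintro rfl
        simp [pvMx] at hlt
        omega
      have hM' : pvMx (l ++ [x]) = pvMx l := by rw [pvMx_append]; omega
      have hfeq : (l ++ [x]).filter (fun p => p.2 == pvMx (l ++ [x]))
          = l.filter (fun p => p.2 == pvMx l) := by
        rw [List.filter_append, hM']
        have : List.filter (fun p => p.2 == pvMx l) [x] = [] := by
          simp; omega
        simp [this]
      have hsame : pvFin (l ++ [x]) = pvFin l := by
        unfold pvFin
        rw [hfeq, hM']
      rw [if_neg hne, if_neg (by simp), hsame, hM']

-- the four indicator scores of one prediction row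
def pvScore (q : String × String × String × String × String) : Int :=
  (if q.2.1 == "One Battle After Another" then (1 : Int) else 0) +
  (if q.2.2.1 == "Michael B. Jordan" then 1 else 0) +
  (if q.2.2.2.1 == "Jessie Buckley" then 1 else 0) +
  (if q.2.2.2.2 == "Paul Thomas Anderson" then 1 else 0)

-- A's insert-then-increment chain equals a single insert of the total score
theorem pvStepEq (d : PySem.Dict String Int) (q : String × String × String × String × String) :
    (let (name, picture, actor, actress, director) := q
      let d := d.insert name 0
      let d := if picture == PySem.List.pyGetD
          ["One Battle After Another", "Michael B. Jordan", "Jessie Buckley", "Paul Thomas Anderson"] 0 ""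
          then d.modify name 0 (· + 1) else d
      let d := if actor == PySem.List.pyGetD
          ["One Battle After Another", "Michael B. Jordan", "Jessie Buckley", "Paul Thomas Anderson"] 1 ""
          then d.modify name 0 (· + 1) else d
      let d := if actress == PySem.List.pyGetD
          ["One Battle After Another", "Michael B. Jordan", "Jessie Buckley", "Paul Thomas Anderson"] 2 ""
          then d.modify name 0 (· + 1) else d
      let d := if director == PySem.List.pyGetD
          ["One Battle After Another", "Michael B. Jordan", "Jessie Buckley", "Paul Thomas Anderson"] 3 ""
          then d.modify name 0 (· + 1) else d
      d) = d.insert q.1 (pvScore q) := by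
  obtain ⟨name, picture, actor, actress, director⟩ := q
  have e0 : PySem.List.pyGetD
      ["One Battle After Another", "Michael B. Jordan", "Jessie Buckley", "Paul Thomas Anderson"] 0 ""
      = "One Battle After Another" := by decide
  have e1 : PySem.List.pyGetD
      ["One Battle After Another", "Michael B. Jordan", "Jessie Buckley", "Paul Thomas Anderson"] 1 ""
      = "Michael B. Jordan" := by decide
  have e2 : PySem.List.pyGetD
      ["One Battle After Another", "Michael B. Jordan", "Jessie Buckley", "Paul Thomas Anderson"] 2 ""
      = "Jessie Buckley" := by decide
  have e3 : PySem.List.pyGetD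
      ["One Battle After Another", "Michael B. Jordan", "Jessie Buckley", "Paul Thomas Anderson"] 3 ""
      = "Paul Thomas Anderson" := by decide
  simp only [pvScore, PySem.Dict.modify, e0, e1, e2, e3]
  split_ifs <;>
    simp_all [PySem.Dict.getD_insert_self, PySem.Dict.insert_insert_self]

-- every value of the built dictionary is one of the nonnegative scores
theorem pvValuesNonneg (preds : List (String × String × String × String × String))
    (d : PySem.Dict String Int) (hd : ∀ p ∈ d.items, 0 ≤ p.2) :
    ∀ p ∈ (preds.foldl (fun d q => d.insert q.1 (pvScore q)) d).items, 0 ≤ p.2 := by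
  induction preds generalizing d with
  | nil => exact hd
  | cons q t ih =>
    refine ih _ (fun p hp => ?_)
    rcases (PySem.Dict.mem_items_insert _ _ _ _).1 hp with rfl | ⟨hmem, _⟩
    · simp only [pvScore]; split_ifs <;> omega
    · exact hd p hmem

-- B's tail (sort descending, read the top two) as a function of the item list
def pvSortTail (l : List (String × Int)) : String :=
  match PySem.List.sorted l (fun kv => kv.2) true with
  | [] => ""
  | (top_name, top) :: rest =>
    if top == 0 || (match rest with | [] => false | (_, s) :: _ => s == top)
    then "Tie" else top_name

-- sort-then-scan computes the canonical answer on nonnegative scores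
theorem pvSortTail_eq (l : List (String × Int)) (hnn : ∀ p ∈ l, 0 ≤ p.2) :
    pvSortTail l = if l = [] then "" else pvFin l := by
  unfold pvSortTail
  have hperm : (PySem.List.sorted l (fun kv => kv.2) true).Perm l := PySem.List.sorted_perm _ _ _
  have hpw : (PySem.List.sorted l (fun kv => kv.2) true).Pairwise (fun a b => b.2 ≤ a.2) :=
    PySem.List.sorted_pairwise_rev l (fun kv => kv.2)
  by_cases hnil : l = []
  · subst hnil
    simp [PySem.List.sorted]
  · have hsne : PySem.List.sorted l (fun kv => kv.2) true ≠ [] := by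
      intro h0
      exact hnil (List.Perm.eq_nil (h0 ▸ hperm).symm)
    obtain ⟨h, t, hht⟩ := List.exists_cons_of_ne_nil hsne
    have hhl : h ∈ l := hperm.mem_iff.1 (hht ▸ List.mem_cons_self)
    have hub : ∀ y ∈ l, y.2 ≤ h.2 := fun y hy =>
      PySem.List.key_head_sorted_rev_ge (xs := l) (key := fun kv => kv.2) hht y hy
    have hMnn : 0 ≤ pvMx l := (PySem.List.le_foldl_max_int l Prod.snd 0).1
    have hMub : ∀ p ∈ l, p.2 ≤ pvMx l := (PySem.List.le_foldl_max_int l Prod.snd 0).2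
    have hhm : h.2 = pvMx l := by
      have h1 : h.2 ≤ pvMx l := hMub h hhl
      have h2 : pvMx l ≤ h.2 := by
        rcases pvMx_attained l with h0 | ⟨p, hp, hv⟩
        · have := hnn h hhl; omega
        · have := hub p hp; omega
      omega
    have hfperm : ((PySem.List.sorted l (fun kv => kv.2) true).filter
        (fun p => p.2 == pvMx l)).Perm (l.filter (fun p => p.2 == pvMx l)) :=
      hperm.filter _
    rw [hht] at hpw hfperm
    obtain ⟨hn, hs⟩ := h
    simp only at hhm
    rw [hht, if_neg hnil]
    by_cases hz : hs = 0
    · -- maximum is zero: both sides "Tie"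
      have hm0 : ¬ 0 < pvMx l := by omega
      simp [pvFin, hz, hm0]
    · have hzpos : 0 < pvMx l := by have := hnn _ hhl; simp at this; omega
      cases t with
      | nil =>
        have hfl : l.filter (fun p => p.2 == pvMx l) = [(hn, hs)] := by
          have hf : (((hn, hs) :: []) : List (String × Int)).filter
              (fun p => p.2 == pvMx l) = [(hn, hs)] := by simp [hhm]
          exact List.perm_singleton.mp (hf ▸ hfperm).symm
        simp [pvFin, hfl, hzpos, hz]
      | cons s t' =>
        obtain ⟨sn, ss⟩ := s
        have hsh : ss ≤ hs := (List.pairwise_cons.mp hpw).1 _ List.mem_cons_self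
        have ht' : ∀ x ∈ t', x.2 ≤ ss :=
          (List.pairwise_cons.mp (List.pairwise_cons.mp hpw).2).1
        by_cases hss : ss = hs
        · -- second entry ties the maximum: both sides "Tie"
          have hf2 : (((hn, hs) :: (sn, ss) :: t') : List (String × Int)).filter
              (fun p => p.2 == pvMx l) = (hn, hs) :: (sn, ss) :: t'.filter (fun p => p.2 == pvMx l) := by
            simp [hhm, hss ▸ hhm]
          have hlen : (l.filter (fun p => p.2 == pvMx l)).length ≠ 1 := by
            have := hfperm.length_eq
            rw [hf2] at this
            simp at this
            omega
          have hTie : pvFin l = "Tie" := by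
            unfold pvFin
            rw [if_neg (by simp [hlen])]
          simp [hss, hTie]
        · -- second entry is strictly below: unique winner
          have hfs : (((sn, ss) :: t') : List (String × Int)).filter
              (fun p => p.2 == pvMx l) = [] := by
            rw [List.filter_eq_nil_iff]
            intro x hx
            rcases List.mem_cons.mp hx with rfl | hx'
            · simp only [beq_iff_eq]; omega
            · have := ht' x hx'; simp only [beq_iff_eq]; omega
          have hfl : l.filter (fun p => p.2 == pvMx l) = [(hn, hs)] := by
            have hf : (((hn, hs) :: (sn, ss) :: t') : List (String × Int)).filter
                (fun p => p.2 == pvMx l) = [(hn, hs)] := by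
              rw [List.filter_cons_of_pos (by simp [hhm]), hfs]
            exact List.perm_singleton.mp (hf ▸ hfperm).symm
          simp [pvFin, hfl, hzpos, hz, hss]


-- ===== VERDICT (by name: the statement is the Claim_ definition above) =====
theorem oscar_pool_spec : Claim_equal_oscar_pool := by
  intro preds _hdom
  unfold Spec_oscar_pool
  have hbuild := congrFun (congrArg
      (fun f => List.foldl f (PySem.Dict.empty : PySem.Dict String Int))
      (funext fun d => funext fun q => pvStepEq d q)) preds
  have hnn : ∀ p ∈ (List.foldl (fun (d : PySem.Dict String Int) q => d.insert q.1 (pvScore q))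
      PySem.Dict.empty preds).items, 0 ≤ p.2 :=
    pvValuesNonneg preds PySem.Dict.empty (by intro p hp; simp [PySem.Dict.empty] at hp)
  have hA : oscar_pool preds = (List.foldl pvStep ("", 0)
      (List.foldl (fun (d : PySem.Dict String Int) q => d.insert q.1 (pvScore q))
        PySem.Dict.empty preds).items).1 := by
    unfold oscar_pool
    exact congrArg (fun d : PySem.Dict String Int => (List.foldl pvStep ("", 0) d.items).1) hbuild
  have hB : oscar_pool_alt preds = pvSortTail
      (List.foldl (fun (d : PySem.Dict String Int) q => d.insert q.1 (pvScore q))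
        PySem.Dict.empty preds).items := rfl
  rw [hA, hB, pvSortTail_eq _ hnn, pvLoop _ hnn]
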